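-- pv_equiv track=rewrite | github.com/RijithApPro/hackathon3 | challenge2_asil_analyst/asil_analyst.py | describe_decomposition
-- ===== SOURCE A (Python) =====
-- from typing import List, Tuple
--
-- ASIL_LEVELS = ("QM", "A", "B", "C", "D")
--
-- ASIL_VALUE: dict[str, int] = {level: i for i, level in enumerate(ASIL_LEVELS)}
--
-- DECOMPOSITIONS: dict[str, List[Tuple[str, str]]] = {
--     "D": [("D", "QM"), ("C", "A"), ("B", "B")],
--     "C": [("C", "QM"), ("B", "A")],
--     "B": [("B", "QM"), ("A", "A")],
--     "A": [("A", "QM")],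
--     "QM": [],  # QM cannot be decomposed further
-- }
--
-- def describe_decomposition(original: str) -> str:
--     """Return a human-readable description of all valid decompositions.
--
--     Args:
--         original: The ASIL level to describe.
--
--     Returns:
--         Multi-line string summarising valid decompositions.
--     """
--     original = _validate(original)
--     decompositions = DECOMPOSITIONS[original]
--     if not decompositions:
--         return f"ASIL {original}: No decomposition possible (already at lowest level)."
--
--     lines = [f"ASIL {original} valid decompositions (ISO 26262-9):"]
--     for idx, (a, b) in enumerate(decompositions, start=1):
--         lines.append(f"  {idx}. ASIL {original} → ASIL {a}(a) + ASIL {b}(b)")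
--     return "\n".join(lines)
--
-- def _validate(asil: str) -> str:
--     """Normalise and validate an ASIL level string."""
--     asil = asil.strip().upper()
--     if asil not in ASIL_VALUE:
--         raise ValueError(
--             f"Unknown ASIL level '{asil}'. Valid levels: {', '.join(ASIL_LEVELS)}"
--         )
--     return asil
-- ===== SOURCE B (Python) =====
-- ASIL_LEVELS = ("QM", "A", "B", "C", "D")
-- ASIL_VALUE = {level: i for i, level in enumerate(ASIL_LEVELS)}
--
-- def describe_decomposition(original: str) -> str:
--     asil = original.strip().upper()
--     if asil not in ASIL_VALUE:
--         raise ValueError(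
--             f"Unknown ASIL level '{asil}'. Valid levels: {', '.join(ASIL_LEVELS)}"
--         )
--     v = ASIL_VALUE[asil]
--     # compute the decomposition pairs instead of a lookup table:
--     # a runs from v downward while a > 0 and 2*a >= v
--     pairs = []
--     a = v
--     while a > 0 and 2 * a >= v:
--         pairs.append((ASIL_LEVELS[a], ASIL_LEVELS[v - a]))
--         a -= 1
--     if not pairs:
--         return f"ASIL {asil}: No decomposition possible (already at lowest level)."
--     lines = [f"ASIL {asil} valid decompositions (ISO 26262-9):"]
--     for idx, (x, y) in enumerate(pairs, start=1):
--         lines.append(f"  {idx}. ASIL {asil} → ASIL {x}(a) + ASIL {y}(b)")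
--     return "\n".join(lines)
-- ===== Notes on version B (the rewrite author's own statement) =====
-- stated objective: simpler
-- what changed: B drops the hard-coded DECOMPOSITIONS lookup table and computes the decomposition pairs from the level's numeric value with a downward while-loop (a from v while a>0 and 2*a>=v), reproducing every table entry in order.
import Mathlib
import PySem

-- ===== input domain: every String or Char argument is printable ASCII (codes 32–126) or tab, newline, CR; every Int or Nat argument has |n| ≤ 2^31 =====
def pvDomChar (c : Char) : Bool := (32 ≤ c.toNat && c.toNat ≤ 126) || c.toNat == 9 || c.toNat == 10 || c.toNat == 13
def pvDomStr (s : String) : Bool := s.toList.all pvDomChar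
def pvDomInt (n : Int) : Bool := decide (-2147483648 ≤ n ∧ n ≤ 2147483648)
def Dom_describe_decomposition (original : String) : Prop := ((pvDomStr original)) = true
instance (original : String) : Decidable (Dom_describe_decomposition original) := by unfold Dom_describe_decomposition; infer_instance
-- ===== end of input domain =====

-- B replaces A's hard-coded DECOMPOSITIONS lookup table by computing the pairs
-- from the ASIL's numeric value with a downward loop (objective: simpler).
-- Pre_ excludes inputs whose stripped/uppercased form is not a valid ASIL level,
-- on which A raises ValueError.

-- ===== PORT A =====
-- ASIL_LEVELS = ("QM", "A", "B", "C", "D")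
def pvAsilLevels : List String := ["QM", "A", "B", "C", "D"]

-- ASIL_VALUE = {level: i for i, level in enumerate(ASIL_LEVELS)}
def pvAsilValue : PySem.Dict String Int :=
  (PySem.List.enumerate pvAsilLevels).foldl (fun d p => d.insert p.2 p.1) PySem.Dict.empty

-- DECOMPOSITIONS table (literal dict, insertion order)
def pvDecompositions : PySem.Dict String (List (String × String)) :=
  PySem.Dict.ofList
    [("D", [("D", "QM"), ("C", "A"), ("B", "B")]),
     ("C", [("C", "QM"), ("B", "A")]),
     ("B", [("B", "QM"), ("A", "A")]),
     ("A", [("A", "QM")]),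
     ("QM", [])]

-- _validate: strip + upper, raise ValueError if not a key of ASIL_VALUE (none = raise)
def pvValidate (asil : String) : Option String :=
  let a := PySem.Str.upper (PySem.Str.strip asil)
  if pvAsilValue.contains a then some a else none

-- body of describe_decomposition after _validate (factored out so the proof can
-- reason about the normalised level)
def pvABody (v : Option String) : String :=
  match v with
  | none => ""   -- ValueError path, excluded by Pre_
  | some orig =>
    match pvDecompositions.get? orig with
    | none => ""   -- unreachable: every valid level is a key
    | some decs =>
      if decs.isEmpty then
        "ASIL " ++ orig ++ ": No decomposition possible (already at lowest level)."
      else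
        let lines :=
          (PySem.List.enumerate decs 1).foldl
            (fun ls p =>
              ls ++ ["  " ++ PySem.Int.toStr p.1 ++ ". ASIL " ++ orig ++ " → ASIL "
                     ++ p.2.1 ++ "(a) + ASIL " ++ p.2.2 ++ "(b)"])
            ["ASIL " ++ orig ++ " valid decompositions (ISO 26262-9):"]
        PySem.Str.join "\n" lines

def describe_decomposition (original : String) : String :=
  pvABody (pvValidate original)

-- ===== PORT B =====
-- while a > 0 and 2*a >= v: pairs.append((ASIL_LEVELS[a], ASIL_LEVELS[v-a])); a -= 1
def pvBLoop (v : Int) (a : Nat) (acc : List (String × String)) : List (String × String) :=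
  match a with
  | 0 => acc   -- while-condition a > 0 fails
  | Nat.succ a' =>
    if v ≤ 2 * (a : Int) then
      pvBLoop v a'
        (acc ++ [((PySem.List.pyGet? pvAsilLevels (a : Int)).getD "",
                  (PySem.List.pyGet? pvAsilLevels (v - (a : Int))).getD "")])
    else acc

-- body of B after normalisation (factored out, same reason)
def pvBBody (asil : String) : String :=
  if pvAsilValue.contains asil then
    let v := pvAsilValue.getD asil 0
    let pairs := pvBLoop v v.toNat []
    if pairs.isEmpty then
      "ASIL " ++ asil ++ ": No decomposition possible (already at lowest level)."
    else
      let lines :=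
        (PySem.List.enumerate pairs 1).foldl
          (fun ls p =>
            ls ++ ["  " ++ PySem.Int.toStr p.1 ++ ". ASIL " ++ asil ++ " → ASIL "
                   ++ p.2.1 ++ "(a) + ASIL " ++ p.2.2 ++ "(b)"])
          ["ASIL " ++ asil ++ " valid decompositions (ISO 26262-9):"]
      PySem.Str.join "\n" lines
  else ""   -- ValueError path, excluded by Pre_

def describe_decomposition_alt (original : String) : String :=
  pvBBody (PySem.Str.upper (PySem.Str.strip original))

-- ===== PRECONDITION & SPEC =====
-- Pre_ excludes exactly the inputs on which A's _validate raises ValueError.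
def Pre_describe_decomposition (original : String) : Prop :=
  PySem.Str.upper (PySem.Str.strip original) = "QM" ∨
  PySem.Str.upper (PySem.Str.strip original) = "A" ∨
  PySem.Str.upper (PySem.Str.strip original) = "B" ∨
  PySem.Str.upper (PySem.Str.strip original) = "C" ∨
  PySem.Str.upper (PySem.Str.strip original) = "D"
instance (original : String) : Decidable (Pre_describe_decomposition original) := by
  unfold Pre_describe_decomposition; infer_instance

def pvWitness_describe_decomposition : String := " d "

def Spec_describe_decomposition (original : String) (out : String) : Prop :=
  out = describe_decomposition_alt original
instance (original : String) (out : String) : Decidable (Spec_describe_decomposition original out) := by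
  unfold Spec_describe_decomposition; infer_instance

-- ===== CLAIM =====
def Claim_equal_describe_decomposition : Prop :=
  ∀ (original : String), Dom_describe_decomposition original →
    Pre_describe_decomposition original →
    Spec_describe_decomposition original (describe_decomposition original)

-- ===== LEMMAS AND PROOFS =====
theorem pv_eq_QM : pvABody (pvValidate "QM") = pvBBody "QM" := by rfl
theorem pv_eq_A : pvABody (pvValidate "A") = pvBBody "A" := by rfl
theorem pv_eq_B : pvABody (pvValidate "B") = pvBBody "B" := by rfl
theorem pv_eq_C : pvABody (pvValidate "C") = pvBBody "C" := by rfl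
theorem pv_eq_D : pvABody (pvValidate "D") = pvBBody "D" := by rfl

-- ===== VERDICT =====
theorem describe_decomposition_spec : Claim_equal_describe_decomposition := by
  intro original _ hpre
  unfold Spec_describe_decomposition describe_decomposition describe_decomposition_alt pvValidate
  rcases hpre with h | h | h | h | h <;> rw [h]
  · exact pv_eq_QM
  · exact pv_eq_A
  · exact pv_eq_B
  · exact pv_eq_C
  · exact pv_eq_D
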